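-- pv_equiv track=rewrite | github.com/Lumego4/options | app1.py | parse_tickers_from_text
-- ===== SOURCE A (Python) =====
-- from typing import Optional, List, Dict, Any
--
-- def parse_tickers_from_text(text: str) -> List[str]:
--     toks: List[str] = []
--     for piece in text.replace(";", ",").replace("\n", ",").split(","):
--         for q in piece.strip().split():
--             if q.strip():
--                 toks.append(q.strip().upper())
--     # de-duplicate preserving order
--     seen, out = set(), []
--     for t in toks:
--         if t not in seen:
--             seen.add(t)
--             out.append(t)
--     return out
-- ===== SOURCE B (Python) =====
-- def parse_tickers_from_text(text: str) -> list:
--     # Single left-to-right character scan: flush the current run at any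
--     # separator (semicolon, comma or whitespace); dedupe via dict insertion order.
--     out = {}
--     cur = []
--     for ch in text:
--         if ch == ';' or ch == ',' or ch.isspace():
--             if cur:
--                 out[''.join(cur).upper()] = None
--                 cur = []
--         else:
--             cur.append(ch)
--     if cur:
--         out[''.join(cur).upper()] = None
--     return list(out)
-- ===== Notes on version B (the rewrite author's own statement) =====
-- stated objective: alternative
-- what changed: A's two replace passes, a split on commas, and a per-piece whitespace split feeding a seen-set dedupe loop are replaced by one single left-to-right character scan that flushes the current token run at any separator (semicolon, comma or whitespace) and dedupes via dict insertion order.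
import Mathlib
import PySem

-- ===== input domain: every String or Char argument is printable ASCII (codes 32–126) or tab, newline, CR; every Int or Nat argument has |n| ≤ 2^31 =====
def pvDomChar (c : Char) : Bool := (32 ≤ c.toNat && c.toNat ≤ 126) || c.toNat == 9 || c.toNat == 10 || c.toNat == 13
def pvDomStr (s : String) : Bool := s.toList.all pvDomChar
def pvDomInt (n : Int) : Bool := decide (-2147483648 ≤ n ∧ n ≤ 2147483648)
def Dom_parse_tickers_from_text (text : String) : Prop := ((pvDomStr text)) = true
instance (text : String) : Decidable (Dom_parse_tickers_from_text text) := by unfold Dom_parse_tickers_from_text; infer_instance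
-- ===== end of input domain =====

-- B replaces A's replace/replace/split-on-comma-then-whitespace-split nested loops by one
-- single left-to-right character scan that flushes the current run at any separator,
-- with dict-insertion-order dedupe (objective: alternative single-pass tokenization).

-- ===== PORT A =====
def parse_tickers_from_text (text : String) : List String :=
  -- text.replace(";", ",").replace("\n", ",").split(",")  (split on the nonempty literal ",")
  let pieces := PySem.Chars.splitOn
      (PySem.Chars.replace (PySem.Chars.replace text.toList [';'] [',']) ['\n'] [',']) [',']
  -- for piece in …: for q in piece.strip().split(): if q.strip(): toks.append(q.strip().upper())
  let toks := pieces.foldl (fun toks piece =>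
      (PySem.Chars.split₀ (PySem.Chars.strip piece)).foldl (fun toks q =>
        if !(PySem.Chars.strip q).isEmpty then
          toks ++ [String.ofList (PySem.Chars.upper (PySem.Chars.strip q))]
        else toks) toks) []
  -- seen, out = set(), []; for t in toks: if t not in seen: seen.add(t); out.append(t)
  let fin := toks.foldl (fun (p : PySem.Set String × List String) t =>
      if PySem.Set.contains p.1 t then p else (PySem.Set.add p.1 t, p.2 ++ [t]))
      (PySem.Set.empty, ([] : List String))
  fin.2

-- ===== PORT B =====
-- single pass over the characters; `out` is Source B's insertion-ordered dict of keys
-- (first insertion wins and keeps its place = PySem.Set.add), `cur` the current run.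
def parse_tickers_from_text_alt (text : String) : List String :=
  let st := text.toList.foldl
    (fun (st : PySem.Set String × List Char) ch =>
      if ch == ';' || ch == ',' || PySem.Chars.isspace ch then
        (if st.2.isEmpty then st
         else (PySem.Set.add st.1 (String.ofList (PySem.Chars.upper st.2)), []))
      else (st.1, st.2 ++ [ch]))
    (PySem.Set.empty, ([] : List Char))
  if st.2.isEmpty then st.1
  else PySem.Set.add st.1 (String.ofList (PySem.Chars.upper st.2))

-- ===== PRECONDITION & SPEC =====
def Spec_parse_tickers_from_text (text : String) (out : List String) : Prop := out = parse_tickers_from_text_alt text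
instance (text : String) (out : List String) : Decidable (Spec_parse_tickers_from_text text out) := by unfold Spec_parse_tickers_from_text; infer_instance

-- ===== CLAIM (what is proved, stated in full; the proofs are below) =====
def Claim_equal_parse_tickers_from_text : Prop := ∀ (text : String), Dom_parse_tickers_from_text text → Spec_parse_tickers_from_text text (parse_tickers_from_text text)

-- ===== LEMMAS AND PROOFS =====
def pvSubst (c : Char) : Char :=
  if (if c == ';' then ',' else c) == '\n' then ',' else (if c == ';' then ',' else c)
def pvSep (c : Char) : Bool := c == ';' || c == ',' || PySem.Chars.isspace c
def pvTok : List Char → List Char → List (List Char)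
  | [], cur => if cur.isEmpty then [] else [cur.reverse]
  | c :: rest, cur =>
    if pvSep c then (if cur.isEmpty then pvTok rest [] else cur.reverse :: pvTok rest [])
    else pvTok rest (c :: cur)
def pvW : List Char → List Char → List (List Char)
  | [], cur => if cur.isEmpty then [] else [cur.reverse]
  | c :: rest, cur =>
    if PySem.Chars.isspace c then (if cur.isEmpty then pvW rest [] else cur.reverse :: pvW rest [])
    else pvW rest (c :: cur)
def pvWC : List Char → List Char → List (List Char)
  | [], cur => if cur.isEmpty then [] else [cur.reverse]
  | c :: rest, cur =>
    if c == ',' || PySem.Chars.isspace c then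
      (if cur.isEmpty then pvWC rest [] else cur.reverse :: pvWC rest [])
    else pvWC rest (c :: cur)
def pvSC : List Char → List Char → List (List Char)
  | [], cur => [cur.reverse]
  | c :: rest, cur =>
    if c == ',' then cur.reverse :: pvSC rest [] else pvSC rest (c :: cur)
theorem pv_rep_go (a b : Char) : ∀ (l acc : List Char) (fuel : Nat),
    l.length ≤ fuel →
    PySem.Chars.replace.go [a] [b] fuel l acc
      = acc.reverse ++ l.map (fun c => if c == a then b else c) := by
  intro l
  induction l with
  | nil =>
    intro acc fuel _
    cases fuel <;> simp [PySem.Chars.replace.go]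
  | cons c t ih =>
    intro acc fuel h
    cases fuel with
    | zero => simp at h
    | succ n =>
      simp only [PySem.Chars.replace.go]
      by_cases hc : c = a
      · subst hc
        have hp : List.isPrefixOf [c] (c :: t) = true := by simp [List.isPrefixOf]
        simp only [hp, if_pos rfl, List.length_cons] at *
        simp only [if_true, List.length_nil, List.length_singleton, List.drop_succ_cons,
          List.drop_zero, List.reverse_singleton, List.singleton_append]
        rw [ih (b :: acc) n (by omega)]
        simp
      · have hp : List.isPrefixOf [a] (c :: t) = false := by
          simp [List.isPrefixOf]; intro h'; exact absurd h'.symm hc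
        have hbe : (c == a) = false := by simp [hc]
        simp only [hp, Bool.false_eq_true, if_false]
        rw [ih (c :: acc) n (by simpa using Nat.le_of_succ_le_succ h)]
        simp only [List.reverse_cons, List.map_cons, hbe, Bool.false_eq_true, if_false,
          List.append_assoc, List.singleton_append]

theorem pv_replace_single (a b : Char) (l : List Char) :
    PySem.Chars.replace l [a] [b] = l.map (fun c => if c == a then b else c) := by
  simp only [PySem.Chars.replace, List.isEmpty_cons, Bool.false_eq_true, if_false]
  rw [pv_rep_go a b l [] l.length (le_refl _)]
  simp

theorem pv_so_go : ∀ (l cur acc : List Char) (hacc : List (List Char)) (fuel : Nat),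
    l.length < fuel →
    PySem.Chars.splitOn.go [','] fuel l cur hacc = hacc.reverse ++ pvSC l cur := by
  intro l
  induction l with
  | nil =>
    intro cur acc hacc fuel h
    cases fuel with
    | zero => simp at h
    | succ n => simp [PySem.Chars.splitOn.go, pvSC]
  | cons c t ih =>
    intro cur acc hacc fuel h
    cases fuel with
    | zero => simp at h
    | succ n =>
      simp only [PySem.Chars.splitOn.go]
      by_cases hc : c = ','
      · subst hc
        have hp : List.isPrefixOf [','] (',' :: t) = true := by simp [List.isPrefixOf]
        simp only [hp, if_pos rfl]
        simp only [if_true, List.length_nil, List.length_singleton, List.drop_succ_cons,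
          List.drop_zero, List.reverse_singleton, List.singleton_append]
        rw [ih [] acc (cur.reverse :: hacc) n (by simp at h ⊢; omega)]
        simp [pvSC]
      · have hp : List.isPrefixOf [','] (c :: t) = false := by
          simp [List.isPrefixOf]; intro h'; exact absurd h'.symm hc
        have hbe : (c == ',') = false := by simp [hc]
        simp only [hp, Bool.false_eq_true, if_false]
        rw [ih (c :: cur) acc hacc n (by simp at h ⊢; omega)]
        simp [pvSC, hbe]

theorem pv_splitOn_comma (l : List Char) :
    PySem.Chars.splitOn l [','] = pvSC l [] := by
  simp only [PySem.Chars.splitOn]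
  rw [pv_so_go l [] [] [] (l.length + 1) (by omega)]
  simp

theorem pv_s0_go : ∀ (l cur : List Char) (hacc : List (List Char)),
    PySem.Chars.split₀.go l cur hacc = hacc.reverse ++ pvW l cur := by
  intro l
  induction l with
  | nil =>
    intro cur hacc
    by_cases h : cur.isEmpty <;> simp [PySem.Chars.split₀.go, pvW, h]
  | cons c t ih =>
    intro cur hacc
    simp only [PySem.Chars.split₀.go, pvW]
    by_cases hs : PySem.Chars.isspace c
    · by_cases h : cur.isEmpty
      · simp only [hs, h, if_pos rfl, if_true]
        rw [ih]
      · simp only [hs, h, if_pos rfl, Bool.false_eq_true, if_false]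
        rw [ih]
        simp
    · simp only [hs, Bool.false_eq_true, if_false]
      rw [ih]

theorem pv_split0_eq (l : List Char) : PySem.Chars.split₀ l = pvW l [] := by
  simpa using pv_s0_go l [] []
theorem pv_pvW_spaces_suffix : ∀ (l tail cur : List Char),
    (∀ c ∈ tail, PySem.Chars.isspace c = true) →
    pvW (l ++ tail) cur = pvW l cur := by
  intro l
  induction l with
  | nil =>
    intro tail
    induction tail with
    | nil => intro cur _; rfl
    | cons c t iht =>
      intro cur h
      have hc := h c (by simp)
      have iht' := iht [] (fun x hx => h x (by simp [hx]))
      simp only [List.nil_append] at iht' ⊢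
      by_cases hcur : cur.isEmpty
      · simp only [pvW, hc, hcur, if_true]
        rw [iht']
        simp [pvW, hcur]
      · simp only [pvW, hc, hcur, if_true, Bool.false_eq_true, if_false]
        rw [iht']
        simp [pvW, hcur]
  | cons c t ih =>
    intro tail cur h
    simp only [List.cons_append, pvW]
    by_cases hs : PySem.Chars.isspace c
    · by_cases hcur : cur.isEmpty <;> simp [hs, hcur, ih tail _ h]
    · simp [hs, ih tail _ h]

theorem pv_pvW_lstrip : ∀ (l : List Char),
    pvW (List.dropWhile PySem.Chars.isspace l) [] = pvW l [] := by
  intro l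
  induction l with
  | nil => rfl
  | cons c t ih =>
    by_cases hs : PySem.Chars.isspace c
    · rw [List.dropWhile_cons_of_pos (by simpa using hs)]
      rw [ih]
      simp [pvW, hs]
    · rw [List.dropWhile_cons_of_neg (by simpa using hs)]

theorem pv_strip_decomp (l : List Char) :
    ∃ tail, l = PySem.Chars.rstrip l ++ tail ∧ ∀ c ∈ tail, PySem.Chars.isspace c = true := by
  refine ⟨(List.takeWhile PySem.Chars.isspace l.reverse).reverse, ?_, ?_⟩
  · symm
    simp only [PySem.Chars.rstrip]
    rw [← List.reverse_append, List.takeWhile_append_dropWhile, List.reverse_reverse]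
  · intro c hc
    rw [List.mem_reverse] at hc
    exact List.mem_takeWhile_imp hc

theorem pv_pvW_strip (l : List Char) :
    pvW (PySem.Chars.strip l) [] = pvW l [] := by
  simp only [PySem.Chars.strip, PySem.Chars.lstrip]
  obtain ⟨tail, heq, hsp⟩ := pv_strip_decomp (List.dropWhile PySem.Chars.isspace l)
  calc pvW (PySem.Chars.rstrip (List.dropWhile PySem.Chars.isspace l)) []
      = pvW (PySem.Chars.rstrip (List.dropWhile PySem.Chars.isspace l) ++ tail) [] :=
        (pv_pvW_spaces_suffix _ tail [] hsp).symm
    _ = pvW (List.dropWhile PySem.Chars.isspace l) [] := by rw [← heq]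
    _ = pvW l [] := pv_pvW_lstrip l

theorem pv_pvW_mem : ∀ (l cur : List Char),
    (∀ c ∈ cur, PySem.Chars.isspace c = false) →
    ∀ q ∈ pvW l cur, q ≠ [] ∧ ∀ c ∈ q, PySem.Chars.isspace c = false := by
  intro l
  induction l with
  | nil =>
    intro cur hcur q hq
    by_cases h : cur.isEmpty
    · simp [pvW, h] at hq
    · simp only [pvW, h, Bool.false_eq_true, if_false, List.mem_singleton] at hq
      subst hq
      constructor
      · simp [List.isEmpty_iff] at h
        simpa using h
      · intro c hc; exact hcur c (by simpa using hc)
  | cons c t ih =>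
    intro cur hcur q hq
    simp only [pvW] at hq
    by_cases hs : PySem.Chars.isspace c
    · by_cases h : cur.isEmpty
      · simp only [hs, h, if_true] at hq
        exact ih [] (by simp) q hq
      · simp only [hs, h, if_true, Bool.false_eq_true, if_false, List.mem_cons] at hq
        rcases hq with hq | hq
        · subst hq
          refine ⟨by simpa [List.isEmpty_iff] using h, ?_⟩
          intro x hx; exact hcur x (by simpa using hx)
        · exact ih [] (by simp) q hq
    · simp only [hs, Bool.false_eq_true, if_false] at hq
      refine ih (c :: cur) ?_ q hq
      intro x hx
      rcases List.mem_cons.1 hx with h | h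
      · subst h; simpa using hs
      · exact hcur x h

theorem pv_strip_nospace (q : List Char)
    (h : ∀ c ∈ q, PySem.Chars.isspace c = false) : PySem.Chars.strip q = q := by
  have hall : ∀ (r : List Char), (∀ c ∈ r, PySem.Chars.isspace c = false) →
      List.dropWhile PySem.Chars.isspace r = r := by
    intro r hr
    cases r with
    | nil => rfl
    | cons a t => rw [List.dropWhile_cons_of_neg (by simp [hr a (by simp)])]
  simp only [PySem.Chars.strip, PySem.Chars.lstrip, PySem.Chars.rstrip]
  rw [hall q h, hall q.reverse (fun c hc => h c (by simpa using hc)), List.reverse_reverse]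

theorem pv_K : ∀ (a b cur : List Char),
    pvWC (a ++ ',' :: b) cur = pvWC a cur ++ pvWC b [] := by
  intro a
  induction a with
  | nil =>
    intro b cur
    by_cases h : cur.isEmpty <;> simp [pvWC, h]
  | cons c t ih =>
    intro b cur
    simp only [List.cons_append, pvWC]
    by_cases hs : (c == ',' || PySem.Chars.isspace c) = true
    · by_cases h : cur.isEmpty <;> simp [hs, h, ih]
    · simp [hs, ih]

theorem pv_E : ∀ (x cur : List Char),
    (∀ c ∈ x, (c == ',') = false) → pvWC x cur = pvW x cur := by
  intro x
  induction x with
  | nil => intro cur _; rfl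
  | cons c t ih =>
    intro cur h
    have hc : (c == ',') = false := h c (by simp)
    have ht : ∀ c ∈ t, (c == ',') = false := fun x hx => h x (by simp [hx])
    simp only [pvWC, pvW, hc, Bool.false_or]
    by_cases hs : PySem.Chars.isspace c
    · by_cases hcur : cur.isEmpty <;> simp [hs, hcur, ih [] ht, ih _ ht]
    · simp [hs, ih _ ht]

theorem pv_M : ∀ (ds cur : List Char),
    (∀ c ∈ cur, (c == ',') = false) →
    (pvSC ds cur).flatMap (fun p => pvW p []) = pvWC (cur.reverse ++ ds) [] := by
  intro ds
  induction ds with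
  | nil =>
    intro cur h
    simp only [pvSC, List.flatMap_cons, List.flatMap_nil, List.append_nil]
    rw [← pv_E cur.reverse [] (fun c hc => h c (by simpa using hc))]
  | cons c t ih =>
    intro cur h
    simp only [pvSC]
    by_cases hc : c = ','
    · subst hc
      simp only [beq_self_eq_true, if_true, List.flatMap_cons]
      rw [ih [] (by simp), pv_K cur.reverse t []]
      rw [pv_E cur.reverse [] (fun x hx => h x (by simpa using hx))]
      simp
    · have hbe : (c == ',') = false := by simp [hc]
      simp only [hbe, Bool.false_eq_true, if_false]
      have hcur : ∀ x ∈ c :: cur, (x == ',') = false := by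
        intro x hx
        rcases List.mem_cons.1 hx with h' | h'
        · subst h'; exact hbe
        · exact h x h'
      rw [ih (c :: cur) hcur]
      simp

theorem pv_SU : ∀ (cs cur : List Char),
    pvWC (cs.map pvSubst) cur = pvTok cs cur := by
  intro cs
  induction cs with
  | nil => intro cur; rfl
  | cons c t ih =>
    intro cur
    simp only [List.map_cons, pvWC, pvTok]
    have hsep : (pvSubst c == ',' || PySem.Chars.isspace (pvSubst c)) = pvSep c := by
      simp only [pvSubst, pvSep]
      by_cases h1 : c = ';'
      · subst h1; decide
      · by_cases h2 : c = '\n'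
        · subst h2; decide
        · have b1 : (c == ';') = false := by simp [h1]
          have b2 : (c == '\n') = false := by simp [h2]
          simp [b1, b2]
    rw [hsep]
    by_cases hs : pvSep c
    · by_cases hcur : cur.isEmpty <;> simp [hs, hcur, ih]
    · have hid : pvSubst c = c := by
        simp only [pvSep, Bool.or_eq_true, beq_iff_eq] at hs
        push_neg at hs
        have hn : c ≠ '\n' := by
          intro hcn; apply hs.2; subst hcn; decide
        simp [pvSubst, hs.1.1, hn]
      simp only [hid, hs, Bool.false_eq_true, if_false]
      exact ih (c :: cur)
theorem pv_inner_fold (L : List (List Char)) :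
    ∀ (toks : List String), (∀ q ∈ L, q ≠ [] ∧ PySem.Chars.strip q = q) →
    L.foldl (fun toks q =>
        if !(PySem.Chars.strip q).isEmpty then
          toks ++ [String.ofList (PySem.Chars.upper (PySem.Chars.strip q))]
        else toks) toks
      = toks ++ L.map (fun q => String.ofList (PySem.Chars.upper q)) := by
  induction L with
  | nil => intro toks _; simp
  | cons q L ih =>
    intro toks h
    obtain ⟨hne, hstr⟩ := h q (by simp)
    have hemp : (PySem.Chars.strip q).isEmpty = false := by
      rw [hstr]; simpa [List.isEmpty_iff] using hne
    simp only [List.foldl_cons, hemp, Bool.not_false, if_true, hstr]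
    rw [ih _ (fun x hx => h x (by simp [hx]))]
    simp [hne]

theorem pv_outer_fold (pieces : List (List Char)) :
    ∀ (toks : List String),
    pieces.foldl (fun toks piece =>
        (PySem.Chars.split₀ (PySem.Chars.strip piece)).foldl (fun toks q =>
          if !(PySem.Chars.strip q).isEmpty then
            toks ++ [String.ofList (PySem.Chars.upper (PySem.Chars.strip q))]
          else toks) toks) toks
      = toks ++ pieces.flatMap (fun p => (pvW p []).map (fun q => String.ofList (PySem.Chars.upper q))) := by
  induction pieces with
  | nil => intro toks; simp
  | cons p ps ih =>
    intro toks
    simp only [List.foldl_cons, List.flatMap_cons]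
    rw [pv_split0_eq, pv_pvW_strip,
      pv_inner_fold _ toks (fun q hq => by
        obtain ⟨h1, h2⟩ := pv_pvW_mem p [] (by simp) q hq
        exact ⟨h1, pv_strip_nospace q h2⟩),
      ih]
    simp

theorem pv_dedup_fold (ts : List String) : ∀ (s : PySem.Set String),
    ts.foldl (fun (p : PySem.Set String × List String) t =>
        if PySem.Set.contains p.1 t then p else (PySem.Set.add p.1 t, p.2 ++ [t])) (s, s)
      = (ts.foldl PySem.Set.add s, ts.foldl PySem.Set.add s) := by
  induction ts with
  | nil => intro s; rfl
  | cons t ts ih =>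
    intro s
    simp only [List.foldl_cons]
    by_cases h : PySem.Set.contains s t
    · have hadd : PySem.Set.add s t = s := by unfold PySem.Set.add; rw [if_pos h]
      simp only [h, if_true, hadd]
      exact ih s
    · have hadd : PySem.Set.add s t = s ++ [t] := by unfold PySem.Set.add; rw [if_neg h]
      simp only [h, Bool.false_eq_true, if_false, hadd]
      exact ih (s ++ [t])

theorem pv_B_fold (cs : List Char) : ∀ (out : PySem.Set String) (cur : List Char),
    (let st := cs.foldl
        (fun (st : PySem.Set String × List Char) ch =>
          if ch == ';' || ch == ',' || PySem.Chars.isspace ch then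
            (if st.2.isEmpty then st
             else (PySem.Set.add st.1 (String.ofList (PySem.Chars.upper st.2)), []))
          else (st.1, st.2 ++ [ch])) (out, cur);
     if st.2.isEmpty then st.1
     else PySem.Set.add st.1 (String.ofList (PySem.Chars.upper st.2)))
      = (pvTok cs cur.reverse).foldl
          (fun o t => PySem.Set.add o (String.ofList (PySem.Chars.upper t))) out := by
  induction cs with
  | nil =>
    intro out cur
    simp only [List.foldl_nil, pvTok, List.isEmpty_reverse, List.reverse_reverse]
    by_cases h : cur.isEmpty <;> simp [h]
  | cons c t ih =>
    intro out cur
    simp only [List.foldl_cons, pvTok]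
    have hsep : pvSep c = (c == ';' || c == ',' || PySem.Chars.isspace c) := rfl
    by_cases hs : (c == ';' || c == ',' || PySem.Chars.isspace c) = true
    · by_cases h : cur.isEmpty
      · have hr : cur = [] := by simpa [List.isEmpty_iff] using h
        simp only [hs, if_true, h, hsep, List.isEmpty_reverse, hr, List.reverse_nil]
        exact ih out []
      · simp only [hs, if_true, h, hsep, List.isEmpty_reverse, Bool.false_eq_true, if_false,
          List.reverse_reverse, List.foldl_cons]
        exact ih (PySem.Set.add out (String.ofList (PySem.Chars.upper cur))) []
    · simp only [hs, hsep, Bool.false_eq_true, if_false]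
      have : (cur ++ [c]).reverse = c :: cur.reverse := by simp
      rw [← this]
      exact ih out (cur ++ [c])
-- ===== VERDICT (by name: the statement is the Claim_ definition above) =====
theorem parse_tickers_from_text_spec : Claim_equal_parse_tickers_from_text := by
  intro text _
  show parse_tickers_from_text text = parse_tickers_from_text_alt text
  have hB : parse_tickers_from_text_alt text
      = (pvTok text.toList []).foldl
          (fun o t => PySem.Set.add o (String.ofList (PySem.Chars.upper t))) PySem.Set.empty := by
    unfold parse_tickers_from_text_alt
    have h := pv_B_fold text.toList PySem.Set.empty []
    simpa using h
  have hA : parse_tickers_from_text text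
      = ((pvTok text.toList []).map
          (fun q => String.ofList (PySem.Chars.upper q))).foldl PySem.Set.add PySem.Set.empty := by
    unfold parse_tickers_from_text
    simp only [pv_replace_single, List.map_map, pv_splitOn_comma]
    rw [pv_outer_fold]
    have hcomp : ((fun c => if c == '\n' then ',' else c) ∘ (fun c => if c == ';' then ',' else c))
        = pvSubst := rfl
    rw [hcomp, ← List.map_flatMap, pv_M _ [] (by simp)]
    simp only [List.reverse_nil, List.nil_append]
    rw [pv_SU]
    rw [show ((PySem.Set.empty : PySem.Set String), ([] : List String))
        = ((PySem.Set.empty : PySem.Set String), (PySem.Set.empty : PySem.Set String)) from rfl,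
      pv_dedup_fold]
  rw [hA, hB, List.foldl_map]
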